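-- pv_equiv track=rewrite | github.com/jakehoare/leetcode | python_1_to_1000/321_Create_Maximum_Number.py | max_single
-- ===== SOURCE A (Python) =====
-- def max_single(nums, k):
--     stack, n = [], len(nums)
--     for i, num in enumerate(nums):
--         # stack not empty and num is more than top of stack and stack + remaining nums are more than k
--         while stack and num > stack[-1] and (len(stack) + (n - i) > k):
--             stack.pop()
--         if len(stack) < k:
--             stack.append(num)
--     return stack
-- ===== SOURCE B (Python) =====
-- def max_single(nums, k):
--     # Repeatedly select the earliest maximum of the still-feasible window
--     # xs[:len(xs)-t+1], then continue past it with one fewer element to pick.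
--     res = []
--     xs = nums
--     t = min(k, len(nums))
--     while t > 0:
--         window = xs[:len(xs) - t + 1]
--         m = window.index(max(window))
--         res.append(xs[m])
--         xs = xs[m + 1:]
--         t -= 1
--     return res
-- ===== Notes on version B (the rewrite author's own statement) =====
-- stated objective: simpler
-- what changed: Replaces A's pop-from-the-top greedy stack (amortised one pass with a feasibility guard) by a direct recursive selection: repeatedly take the earliest maximum of the still-feasible window and recurse on the remainder with one fewer element to pick.
import Mathlib
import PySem

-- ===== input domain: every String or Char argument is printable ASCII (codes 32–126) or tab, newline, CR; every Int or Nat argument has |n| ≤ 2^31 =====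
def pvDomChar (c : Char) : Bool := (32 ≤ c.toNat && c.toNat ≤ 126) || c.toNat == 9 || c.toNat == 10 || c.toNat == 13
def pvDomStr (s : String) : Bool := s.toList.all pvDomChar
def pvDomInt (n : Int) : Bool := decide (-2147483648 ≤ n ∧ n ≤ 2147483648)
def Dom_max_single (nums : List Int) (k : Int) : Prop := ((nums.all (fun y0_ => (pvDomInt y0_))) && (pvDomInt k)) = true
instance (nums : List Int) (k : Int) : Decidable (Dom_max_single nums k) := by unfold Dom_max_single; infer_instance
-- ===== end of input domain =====

-- B replaces A's greedy pop-stack by direct repeated selection of the earliest window maximum (simpler decomposition, not faster).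

-- ===== PORT A =====
-- the inner 'while stack and num > stack[-1] and (len(stack) + (n - i) > k): stack.pop()' loop
def popLoopA (n k i num : Int) (stack : List Int) : List Int :=
  match h : stack.getLast? with
  | none => stack
  | some top =>
    if num > top ∧ (stack.length : Int) + (n - i) > k then
      popLoopA n k i num stack.dropLast
    else stack
termination_by stack.length
decreasing_by
  have hne : stack ≠ [] := by
    intro hs; rw [hs] at h; simp at h
  have : 0 < stack.length := List.length_pos_iff.mpr hne
  simp [List.length_dropLast]; omega

-- the 'for i, num in enumerate(nums)' loop, state = stack, current index i
def runA (n k i : Int) (stack : List Int) : List Int → List Int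
  | [] => stack
  | num :: rest =>
      let s := popLoopA n k i num stack
      runA n k (i + 1) (if (s.length : Int) < k then s ++ [num] else s) rest

def max_single (nums : List Int) (k : Int) : List Int :=
  runA (nums.length : Int) k 0 [] nums

-- ===== PORT B =====
-- pick(xs, t): earliest maximum of the feasible window xs[:len(xs)-t+1], then recurse past it
def pickB (xs : List Int) (t : Int) : List Int :=
  if h : t ≤ 0 then []
  else
    let window := PySem.List.slice xs none (some ((xs.length : Int) - t + 1))
    let v := (PySem.List.max? window (fun y => y)).getD 0
    let m := (PySem.List.index? window v).getD 0
    (PySem.List.pyGet? xs (m : Int)).getD 0 :: pickB (xs.drop (m + 1)) (t - 1)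
termination_by t.toNat
decreasing_by omega

def max_single_alt (nums : List Int) (k : Int) : List Int :=
  pickB nums (min k (nums.length : Int))

-- ===== PRECONDITION & SPEC =====
def Spec_max_single (nums : List Int) (k : Int) (out : List Int) : Prop := out = max_single_alt nums k
instance (nums : List Int) (k : Int) (out : List Int) : Decidable (Spec_max_single nums k out) := by unfold Spec_max_single; infer_instance

-- ===== CLAIM (what is proved, stated in full; the proofs are below) =====
def Claim_equal_max_single : Prop := ∀ (nums : List Int) (k : Int), Dom_max_single nums k → Spec_max_single nums k (max_single nums k)

-- ===== LEMMAS AND PROOFS =====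

theorem popLoopA_nil (n k i num : Int) : popLoopA n k i num [] = [] := by
  unfold popLoopA; rfl

theorem popLoopA_subset (n k i num : Int) (stack : List Int) :
    ∀ x ∈ popLoopA n k i num stack, x ∈ stack := by
  induction stack using popLoopA.induct n k i num with
  | case1 s h => rw [popLoopA]; split <;> simp_all
  | case2 s top h hc ih =>
      rw [popLoopA]
      split
      · simp
      · next top' h' =>
          rw [h] at h'; cases h'
          rw [if_pos hc]
          intro x hx
          exact List.dropLast_sublist _ |>.mem (ih x hx)
  | case3 s top h hc =>
      rw [popLoopA]
      split
      · simp
      · next top' h' =>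
          rw [h] at h'; cases h'
          rw [if_neg hc]; simp

theorem popLoopA_all (n k i num : Int) :
    ∀ (stack : List Int), (∀ x ∈ stack, num > x) → k ≤ n - i →
      popLoopA n k i num stack = [] := by
  intro stack
  induction stack using popLoopA.induct n k i num with
  | case1 s h =>
      intro _ _
      have hs : s = [] := by simpa using h
      subst hs; rw [popLoopA]; rfl
  | case2 s top h hc ih =>
      intro hall hroom
      rw [popLoopA]
      split
      · next h' => rw [h] at h'; cases h'
      · next top' h' =>
          rw [h] at h'; cases h'
          rw [if_pos hc]
          exact ih (fun x hx => hall x (List.dropLast_sublist _ |>.mem hx)) hroom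
  | case3 s top h hc =>
      intro hall hroom
      exfalso
      have hne : s ≠ [] := by intro hs; rw [hs] at h; simp at h
      have htop : top ∈ s := by
        have := List.getLast?_eq_some_iff.mp h
        rcases this with ⟨l, rfl⟩
        simp
      have hlen : 0 < s.length := List.length_pos_iff.mpr hne
      exact hc ⟨hall top htop, by push_cast; omega⟩

theorem popLoopA_pinned (n k i n' i' num v : Int)
    (hbot : ¬ (num > v ∧ 1 + (n - i) > k)) (hsh : n - i = n' - i') :
    ∀ (s : List Int),
      popLoopA n k i num (v :: s) = v :: popLoopA n' (k - 1) i' num s := by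
  intro s
  induction s using popLoopA.induct n' (k-1) i' num with
  | case1 s h =>
      have hs : s = [] := by simpa using h
      subst hs
      rw [popLoopA]
      split
      · next h' => simp at h'
      · next top h' =>
          simp at h'; subst h'
          rw [if_neg (by simpa using hbot)]
          rw [popLoopA]; rfl
  | case2 s top h hc ih =>
      have hne : s ≠ [] := by intro hs; rw [hs] at h; simp at h
      rw [popLoopA]
      split
      · next h' => simp [List.getLast?_eq_none_iff] at h'
      · next top' h' =>
          have h2 : (v :: s).getLast? = s.getLast? := by
            cases s with
            | nil => exact absurd rfl hne
            | cons a l => simp [List.getLast?_cons_cons]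
          rw [h2, h] at h'; cases h'
          have hlen : ((v :: s).length : Int) = (s.length : Int) + 1 := by simp
          rw [if_pos ⟨hc.1, by have := hc.2; omega⟩]
          have h3 : (v :: s).dropLast = v :: s.dropLast := by
            cases s with
            | nil => exact absurd rfl hne
            | cons a l => rfl
          rw [h3, ih]
          conv_rhs => rw [popLoopA]
          split
          · next h' => rw [h] at h'; cases h'
          · next top' h' =>
              rw [h] at h'; cases h'
              rw [if_pos hc]
  | case3 s top h hc =>
      have hne : s ≠ [] := by intro hs; rw [hs] at h; simp at h
      rw [popLoopA]
      split
      · next h' => simp [List.getLast?_eq_none_iff] at h'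
      · next top' h' =>
          have h2 : (v :: s).getLast? = s.getLast? := by
            cases s with
            | nil => exact absurd rfl hne
            | cons a l => simp [List.getLast?_cons_cons]
          rw [h2, h] at h'; cases h'
          have hlen : ((v :: s).length : Int) = (s.length : Int) + 1 := by simp
          rw [if_neg (by rintro ⟨h1, h2⟩; exact hc ⟨h1, by omega⟩)]
          have hstop : popLoopA n' (k - 1) i' num s = s := by
            rw [popLoopA]
            split
            · rfl
            · next top' h' =>
                rw [h] at h'; cases h'
                rw [if_neg hc]
          rw [hstop]

theorem popLoopA_noPop (n k i num : Int) (s : List Int)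
    (h : (s.length : Int) + (n - i) ≤ k) : popLoopA n k i num s = s := by
  rw [popLoopA]
  split
  · rfl
  · next top h' => rw [if_neg (by rintro ⟨_, h2⟩; omega)]

theorem runA_subset (n k : Int) (xs : List Int) :
    ∀ (i : Int) (s : List Int), ∀ x ∈ runA n k i s xs, x ∈ s ∨ x ∈ xs := by
  induction xs with
  | nil => intro i s x hx; exact Or.inl (by simpa [runA] using hx)
  | cons a rest ih =>
      intro i s x hx
      simp only [runA] at hx
      rcases ih (i + 1) _ x hx with h | h
      · by_cases hcap : ((popLoopA n k i a s).length : Int) < k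
        · rw [if_pos hcap] at h
          rcases List.mem_append.mp h with h | h
          · exact Or.inl (popLoopA_subset n k i a s x h)
          · simp at h; subst h; exact Or.inr (by simp)
        · rw [if_neg hcap] at h
          exact Or.inl (popLoopA_subset n k i a s x h)
      · exact Or.inr (List.mem_cons_of_mem _ h)

theorem runA_append (n k : Int) (as bs : List Int) :
    ∀ (i : Int) (s : List Int),
      runA n k i s (as ++ bs) = runA n k (i + (as.length : Int)) (runA n k i s as) bs := by
  induction as with
  | nil => intro i s; simp [runA]
  | cons a as ih =>
      intro i s
      simp only [List.cons_append, runA]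
      rw [ih]
      congr 1
      simp only [List.length_cons]
      push_cast; ring

theorem runA_zero (n k : Int) (hk : k ≤ 0) (xs : List Int) :
    ∀ (i : Int), runA n k i [] xs = [] := by
  induction xs with
  | nil => intro i; simp [runA]
  | cons a rest ih =>
      intro i
      simp only [runA, popLoopA_nil]
      rw [if_neg (by simp only [List.length_nil, Int.natCast_zero]; omega)]
      exact ih (i + 1)

-- no pops and no capacity misses when the cap is at least stack + remaining input
theorem runA_big (n k : Int) (xs : List Int) :
    ∀ (i : Int) (s : List Int), (s.length : Int) + (xs.length : Int) ≤ k →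
      n - i = (xs.length : Int) → runA n k i s xs = s ++ xs := by
  induction xs with
  | nil => intro i s _ _; simp [runA]
  | cons a rest ih =>
      intro i s hcap hrem
      have hlen : ((a :: rest).length : Int) = (rest.length : Int) + 1 := by simp
      have hnp : popLoopA n k i a s = s := popLoopA_noPop n k i a s (by omega)
      simp only [runA, hnp]
      rw [if_pos (by omega)]
      rw [ih (i + 1) (s ++ [a]) (by simp; push_cast; omega) (by omega)]
      simp

-- bottom element v pinned: the run over the suffix behaves like a fresh run with cap k-1
theorem runA_pinned (n k v : Int) (xs : List Int) :
    ∀ (i n' i' : Int) (s : List Int), n - i = n' - i' →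
      (∀ (t : Nat) (ht : t < xs.length), (i + (t : Int) ≤ n - k) → xs[t] ≤ v) →
      runA n k i (v :: s) xs = v :: runA n' (k - 1) i' s xs := by
  induction xs with
  | nil => intro i n' i' s _ _; simp [runA]
  | cons a rest ih =>
      intro i n' i' s hsh hwin
      have hbot : ¬ (a > v ∧ 1 + (n - i) > k) := by
        rintro ⟨h1, h2⟩
        have := hwin 0 (by simp) (by omega)
        simp at this; omega
      have hpp := popLoopA_pinned n k i n' i' a v hbot hsh s
      simp only [runA, hpp]
      have hwin' : ∀ (t : Nat) (ht : t < rest.length), (i + 1 + (t : Int) ≤ n - k) → rest[t] ≤ v := by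
        intro t ht hle
        have := hwin (t + 1) (by simp; omega) (by push_cast; omega)
        simpa using this
      have hlenP : (((v :: popLoopA n' (k - 1) i' a s).length : Int)) =
          ((popLoopA n' (k - 1) i' a s).length : Int) + 1 := by simp
      by_cases hcap : ((popLoopA n' (k - 1) i' a s).length : Int) < k - 1
      · rw [if_pos (by omega), if_pos hcap]
        rw [List.cons_append]
        exact ih (i + 1) n' (i' + 1) _ (by omega) hwin'
      · rw [if_neg (by omega), if_neg hcap]
        exact ih (i + 1) n' (i' + 1) _ (by omega) hwin'

theorem pickB_zero (xs : List Int) (t : Int) (ht : t ≤ 0) : pickB xs t = [] := by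
  unfold pickB; simp [ht]

theorem pickB_len (xs : List Int) : pickB xs (xs.length : Int) = xs := by
  induction xs with
  | nil => exact pickB_zero [] 0 le_rfl
  | cons x r ih =>
      rw [pickB, dif_neg (by simp only [List.length_cons]; push_cast; omega)]
      have h1 : ((x :: r).length : Int) - ((x :: r).length : Int) + 1 = 1 := by ring
      simp only [h1]
      rw [PySem.List.slice_to]
      simp only [Int.toNat_one, List.take_one, List.head?_cons, Option.toList_some,
        PySem.List.max?_id_cons, List.foldl_nil, Option.getD_some,
        PySem.List.index?_cons_self]
      simp [PySem.List.pyGet?, PySem.List.pyIdx?]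
      exact ih
      norm_num

theorem main_eq (N : Nat) : ∀ (xs : List Int) (k : Int), xs.length = N →
    1 ≤ k → k ≤ (xs.length : Int) →
    runA (xs.length : Int) k 0 [] xs = pickB xs k := by
  induction N using Nat.strong_induction_on with
  | _ N IH =>
  intro xs k hN hk1 hk2
  set wl : Nat := ((xs.length : Int) - k + 1).toNat with hwl
  have hwlInt : (wl : Int) = (xs.length : Int) - k + 1 := by
    rw [hwl, Int.toNat_of_nonneg (by omega)]
  have hwl1 : 1 ≤ wl := by omega
  have hwlen : wl ≤ xs.length := by omega
  set w : List Int := xs.take wl with hwdef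
  have hwlength : w.length = wl := by rw [hwdef]; simp [List.length_take]; omega
  have hwne : w ≠ [] := by
    intro h; rw [h] at hwlength; simp at hwlength; omega
  obtain ⟨v, hv⟩ : ∃ v, PySem.List.max? w (fun y => y) = some v := by
    cases h : PySem.List.max? w (fun y => y) with
    | none => exact absurd ((PySem.List.max?_eq_none_iff w (fun y => y)).mp h) hwne
    | some v => exact ⟨v, rfl⟩
  have hvmem : v ∈ w := PySem.List.max?_mem hv
  have hvmax : ∀ y ∈ w, y ≤ v := by
    intro y hy
    simpa using PySem.List.max?_isMax hv y hy
  obtain ⟨m, hm⟩ : ∃ m, PySem.List.index? w v = some m := by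
    cases h : PySem.List.index? w v with
    | none => rw [PySem.List.index?_eq_none_iff] at h; exact absurd hvmem h
    | some m => exact ⟨m, rfl⟩
  obtain ⟨pre, suf, hwsplit, hprelen, hvpre⟩ := (PySem.List.index?_eq_some_iff w v m).mp hm
  have hprelt : ∀ x ∈ pre, x < v := by
    intro x hx
    have hxw : x ∈ w := by rw [hwsplit]; exact List.mem_append_left _ hx
    have hne : x ≠ v := by rintro rfl; exact hvpre hx
    exact lt_of_le_of_ne (hvmax x hxw) hne
  have hmlt : m < wl := by
    have hlen2 : w.length = pre.length + (suf.length + 1) := by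
      rw [hwsplit]; simp [List.length_append]
    omega
  obtain ⟨hmltw, hwm, hfirst⟩ := PySem.List.getElem_of_index?_eq_some hm
  have hpre_take : pre = xs.take m := by
    have h1 : pre = w.take m := by
      rw [hwsplit, ← hprelen]
      exact List.take_left.symm
    rw [h1, hwdef, List.take_take]
    congr 1
    omega
  set S : List Int := xs.drop (m + 1) with hSdef
  have hmn : m < xs.length := lt_of_lt_of_le hmlt hwlen
  have hxm : xs[m]'hmn = v := by
    have h2 := hwm
    simp only [hwdef] at h2
    simpa using h2
  have hxs : xs = pre ++ v :: S := by
    rw [hpre_take, hSdef]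
    conv_lhs => rw [← List.take_append_drop m xs]
    congr 1
    rw [List.drop_eq_getElem_cons hmn, hxm]
  have hSlen : S.length = xs.length - (m + 1) := by rw [hSdef]; simp
  have hSlenInt : (S.length : Int) = (xs.length : Int) - (m : Int) - 1 := by
    rw [hSlen]; omega
  have L0 : runA (xs.length : Int) k 0 [] xs
      = runA (xs.length : Int) k (0 + (pre.length : Int)) (runA (xs.length : Int) k 0 [] pre) (v :: S) := by
    calc runA (xs.length : Int) k 0 [] xs
        = runA (xs.length : Int) k 0 [] (pre ++ v :: S) := by rw [← hxs]
      _ = _ := runA_append (xs.length : Int) k pre (v :: S) 0 []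
  have hSm : ∀ x ∈ runA (xs.length : Int) k 0 [] pre, v > x := by
    intro x hx
    rcases runA_subset (xs.length : Int) k pre 0 [] x hx with h | h
    · simp at h
    · exact hprelt x h
  have hidx : (0 : Int) + (pre.length : Int) = (m : Int) := by rw [hprelen]; ring
  have L1 : runA (xs.length : Int) k ((m : Int)) (runA (xs.length : Int) k 0 [] pre) (v :: S)
      = runA (xs.length : Int) k ((m : Int) + 1) [v] S := by
    simp only [runA]
    rw [popLoopA_all (xs.length : Int) k (m : Int) v _ hSm (by omega)]
    rw [if_pos (by simp only [List.length_nil, Int.natCast_zero]; omega)]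
    rw [List.nil_append]
  have hwin : ∀ (t : Nat) (ht : t < S.length), ((m : Int) + 1 + (t : Int) ≤ (xs.length : Int) - k) → S[t] ≤ v := by
    intro t ht hle
    have hidx2 : m + 1 + t < xs.length := by omega
    have hS_t : S[t] = xs[m + 1 + t]'hidx2 := by
      have h2 : S = xs.drop (m + 1) := hSdef
      simp only [hSdef]
      simp [Nat.add_assoc]
    have hlt_wl : m + 1 + t < wl := by omega
    have hmemw : xs[m + 1 + t]'hidx2 ∈ w := by
      rw [hwdef]
      have hg : (xs.take wl)[m + 1 + t]'(by simpa [List.length_take] using (by omega : m + 1 + t < min wl xs.length)) = xs[m + 1 + t]'hidx2 := by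
        simp
      exact hg ▸ List.getElem_mem _
    rw [hS_t]; exact hvmax _ hmemw
  have L2 := runA_pinned (xs.length : Int) k v S ((m : Int) + 1) (S.length : Int) 0 [] (by omega) hwin
  have R : pickB xs k = v :: pickB S (k - 1) := by
    rw [pickB, dif_neg (by omega)]
    rw [PySem.List.slice_to]
    rw [← hwl, ← hwdef]
    simp only [hv, hm, Option.getD_some, PySem.List.pyGet?_natCast]
    rw [List.getElem?_eq_getElem hmn, hxm]
    simp only [Option.getD_some]
    rfl
    omega
  rw [L0, hidx, L1, L2, R]
  congr 1
  by_cases hk2' : k - 1 ≤ 0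
  · rw [runA_zero _ _ hk2' S 0, pickB_zero S _ hk2']
  · have hklen : k - 1 ≤ (S.length : Int) := by omega
    exact IH S.length (by omega) S (k - 1) rfl (by omega) hklen

-- ===== VERDICT (by name: the statement is the Claim_ definition above) =====
theorem max_single_spec : Claim_equal_max_single := by
  intro nums k _
  unfold Spec_max_single max_single max_single_alt
  by_cases hk : k ≤ 0
  · rw [runA_zero _ _ hk, pickB_zero]
    omega
  · by_cases hn : (nums.length : Int) ≤ k
    · rw [runA_big _ _ _ _ _ (by simpa using hn) rfl]
      rw [min_eq_right hn, pickB_len]; simp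
    · rw [min_eq_left (by omega)]
      exact main_eq nums.length nums k rfl (by omega) (by omega)
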